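-- pv_equiv track=rewrite | github.com/rltvty/looper | python/src/looper.py | classify_instrument
-- ===== SOURCE A (Python) =====
-- def classify_instrument(name: str, instrument: str) -> str:
--     """Classify instrument into bass, drums, lead, or other."""
--     combined = f"{name} {instrument}".lower()
--
--     if "bass" in combined:
--         return "bass"
--     if any(x in combined for x in ["drum", "percussion", "bongo", "cowbell", "conga", "hi-hat", "snare", "kick"]):
--         return "drums"
--     if any(x in combined for x in ["lead", "solo", "synth", "overdrive", "distortion"]):
--         return "lead"
--     if any(x in combined for x in ["guitar", "piano", "organ", "keys"]):
--         return "other"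
--     return "other"
-- ===== SOURCE B (Python) =====
-- DRUM_KWS = ("drum", "percussion", "bongo", "cowbell", "conga", "hi-hat", "snare", "kick")
-- LEAD_KWS = ("lead", "solo", "synth", "overdrive", "distortion")
--
-- def classify_instrument(name: str, instrument: str) -> str:
--     """Classify instrument into bass, drums, lead, or other.
--
--     Single left-to-right scan of the combined string: at each position record
--     which category has a keyword starting there, then report the flags in
--     priority order (bass, drums, lead) with 'other' as default."""
--     combined = (name + " " + instrument).lower()
--     has_bass = has_drums = has_lead = False
--     for i in range(len(combined)):
--         has_bass = has_bass or combined.startswith("bass", i)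
--         has_drums = has_drums or any(combined.startswith(k, i) for k in DRUM_KWS)
--         has_lead = has_lead or any(combined.startswith(k, i) for k in LEAD_KWS)
--     if has_bass:
--         return "bass"
--     if has_drums:
--         return "drums"
--     if has_lead:
--         return "lead"
--     return "other"
-- ===== Notes on version B (the rewrite author's own statement) =====
-- stated objective: alternative
-- what changed: Replaced the per-keyword substring-search if-chain by a single position-by-position scan of the combined string (a naive multi-pattern matcher) that accumulates one found-flag per category, reported afterwards in priority order.
import Mathlib
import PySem

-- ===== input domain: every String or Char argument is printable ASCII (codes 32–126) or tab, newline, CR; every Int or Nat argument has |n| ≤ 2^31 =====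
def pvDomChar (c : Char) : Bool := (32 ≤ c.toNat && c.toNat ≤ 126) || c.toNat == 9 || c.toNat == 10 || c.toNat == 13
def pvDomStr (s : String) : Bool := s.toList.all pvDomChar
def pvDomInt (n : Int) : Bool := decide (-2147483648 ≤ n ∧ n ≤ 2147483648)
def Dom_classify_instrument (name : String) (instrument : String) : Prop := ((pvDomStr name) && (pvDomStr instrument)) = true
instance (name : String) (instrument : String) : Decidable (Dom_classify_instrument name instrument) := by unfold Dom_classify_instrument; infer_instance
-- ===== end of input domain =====

-- B classifies by one position-by-position scan of the combined string with per-category found flags (naive multi-pattern matching) instead of A's per-keyword substring-search if-chain; alternative decomposition, same cost.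


-- ===== PORT A =====
def classify_instrument (name : String) (instrument : String) : String :=
  let combined := PySem.Str.lower (name ++ " " ++ instrument)
  if PySem.Str.isIn "bass" combined then "bass"
  else if ["drum", "percussion", "bongo", "cowbell", "conga", "hi-hat", "snare", "kick"].any (fun x => PySem.Str.isIn x combined) then "drums"
  else if ["lead", "solo", "synth", "overdrive", "distortion"].any (fun x => PySem.Str.isIn x combined) then "lead"
  else if ["guitar", "piano", "organ", "keys"].any (fun x => PySem.Str.isIn x combined) then "other"
  else "other"

-- ===== PORT B =====
def pvDrumKws : List String := ["drum", "percussion", "bongo", "cowbell", "conga", "hi-hat", "snare", "kick"]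
def pvLeadKws : List String := ["lead", "solo", "synth", "overdrive", "distortion"]

-- the scan loop: one step per position i of the combined string (the suffix c :: rest
-- is combined[i:], and combined.startswith(k, i) = that suffix starts with k)
def pvScan : List Char → Bool → Bool → Bool → Bool × Bool × Bool
  | [], fb, fd, fl => (fb, fd, fl)
  | c :: rest, fb, fd, fl =>
      pvScan rest
        (fb || PySem.Chars.startswith (c :: rest) "bass".toList)
        (fd || pvDrumKws.any (fun k => PySem.Chars.startswith (c :: rest) k.toList))
        (fl || pvLeadKws.any (fun k => PySem.Chars.startswith (c :: rest) k.toList))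

def classify_instrument_alt (name : String) (instrument : String) : String :=
  let combined := PySem.Chars.lower ((name ++ " " ++ instrument).toList)
  let flags := pvScan combined false false false
  if flags.1 then "bass"
  else if flags.2.1 then "drums"
  else if flags.2.2 then "lead"
  else "other"

-- ===== PRECONDITION & SPEC =====
def Spec_classify_instrument (name : String) (instrument : String) (out : String) : Prop := out = classify_instrument_alt name instrument
instance (name : String) (instrument : String) (out : String) : Decidable (Spec_classify_instrument name instrument out) := by unfold Spec_classify_instrument; infer_instance

-- ===== CLAIM (what is proved, stated in full; the proofs are below) =====
def Claim_equal_classify_instrument : Prop := ∀ (name : String) (instrument : String), Dom_classify_instrument name instrument → Spec_classify_instrument name instrument (classify_instrument name instrument)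

-- ===== LEMMAS AND PROOFS =====

-- one scan step absorbed: starts-here-or-occurs-in-tail = occurs-in-whole
lemma pvStep_eq (c : Char) (rest : List Char) (kw : List Char) :
    (PySem.Chars.startswith (c :: rest) kw || PySem.Chars.isIn kw rest)
      = PySem.Chars.isIn kw (c :: rest) := by
  rw [Bool.eq_iff_iff]
  simp [PySem.Chars.startswith_iff, PySem.Chars.isIn_iff_infix, List.infix_cons_iff]

lemma pvScan_eq (s : List Char) (fb fd fl : Bool) :
    pvScan s fb fd fl =
      (fb || PySem.Chars.isIn "bass".toList s,
       fd || pvDrumKws.any (fun k => PySem.Chars.isIn k.toList s),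
       fl || pvLeadKws.any (fun k => PySem.Chars.isIn k.toList s)) := by
  induction s generalizing fb fd fl with
  | nil =>
      have h : ∀ kw : List Char, PySem.Chars.isIn kw [] = decide (kw = []) := by
        intro kw; rw [Bool.eq_iff_iff]; simp [PySem.Chars.isIn_iff_infix]
      simp [pvScan, pvDrumKws, pvLeadKws, h]
  | cons c rest ih =>
      rw [pvScan, ih]
      refine Prod.ext ?_ (Prod.ext ?_ ?_) <;> simp only
      · rw [Bool.or_assoc, pvStep_eq]
      · rw [Bool.or_assoc, Bool.eq_iff_iff]
        simp only [Bool.or_eq_true, List.any_eq_true]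
        constructor
        · rintro (h | ⟨k, hk, h⟩ | ⟨k, hk, h⟩)
          · exact Or.inl h
          · exact Or.inr ⟨k, hk, by rw [← pvStep_eq c rest, h]; simp⟩
          · exact Or.inr ⟨k, hk, by rw [← pvStep_eq c rest, h]; simp⟩
        · rintro (h | ⟨k, hk, h⟩)
          · exact Or.inl h
          · rw [← pvStep_eq c rest] at h
            rcases Bool.or_eq_true_iff.mp h with h | h
            · exact Or.inr (Or.inl ⟨k, hk, h⟩)
            · exact Or.inr (Or.inr ⟨k, hk, h⟩)
      · rw [Bool.or_assoc, Bool.eq_iff_iff]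
        simp only [Bool.or_eq_true, List.any_eq_true]
        constructor
        · rintro (h | ⟨k, hk, h⟩ | ⟨k, hk, h⟩)
          · exact Or.inl h
          · exact Or.inr ⟨k, hk, by rw [← pvStep_eq c rest, h]; simp⟩
          · exact Or.inr ⟨k, hk, by rw [← pvStep_eq c rest, h]; simp⟩
        · rintro (h | ⟨k, hk, h⟩)
          · exact Or.inl h
          · rw [← pvStep_eq c rest] at h
            rcases Bool.or_eq_true_iff.mp h with h | h
            · exact Or.inr (Or.inl ⟨k, hk, h⟩)
            · exact Or.inr (Or.inr ⟨k, hk, h⟩)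

-- ===== VERDICT (by name: the statement is the Claim_ definition above) =====
theorem classify_instrument_spec : Claim_equal_classify_instrument := by
  intro name instrument _
  unfold Spec_classify_instrument classify_instrument classify_instrument_alt
  simp only [pvScan_eq, Bool.false_or, pvDrumKws, pvLeadKws, PySem.Str.isIn_eq,
    PySem.Str.toList_lower]
  split_ifs <;> simp_all
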